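-- pv_equiv track=rewrite | github.com/egemose/DroneVideoMeasure | drone_log_data.py | get_video_ranges
-- ===== SOURCE A (Python) =====
-- def get_video_ranges(is_video, time_stamp):
--     last_state = False
--     video_begin = None
--     t = 0
--     for k, t in zip(is_video, time_stamp):
--         if k and not last_state:
--             video_begin = t
--         if not k and last_state:
--             yield video_begin, t
--         last_state = k
--     if last_state:
--         yield video_begin, t
-- ===== SOURCE B (Python) =====
-- def get_video_ranges(is_video, time_stamp):
--     pairs = list(zip(is_video, time_stamp))
--     n = len(pairs)
--     i = 0
--     while i < n:
--         if pairs[i][0]: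
--             begin = pairs[i][1]
--             j = i + 1
--             while j < n and pairs[j][0]:
--                 j += 1
--             if j == n:
--                 yield begin, pairs[-1][1]
--             else:
--                 yield begin, pairs[j][1]
--             i = j
--         else:
--             i += 1
-- ===== Notes on version B (the rewrite author's own statement) =====
-- stated objective: alternative
-- what changed: B materializes the zipped pairs and scans maximal contiguous True runs with explicit indices (inner pointer finds each run's end), instead of A's one-pass transition-flag state machine with last_state/video_begin.
import Mathlib
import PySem

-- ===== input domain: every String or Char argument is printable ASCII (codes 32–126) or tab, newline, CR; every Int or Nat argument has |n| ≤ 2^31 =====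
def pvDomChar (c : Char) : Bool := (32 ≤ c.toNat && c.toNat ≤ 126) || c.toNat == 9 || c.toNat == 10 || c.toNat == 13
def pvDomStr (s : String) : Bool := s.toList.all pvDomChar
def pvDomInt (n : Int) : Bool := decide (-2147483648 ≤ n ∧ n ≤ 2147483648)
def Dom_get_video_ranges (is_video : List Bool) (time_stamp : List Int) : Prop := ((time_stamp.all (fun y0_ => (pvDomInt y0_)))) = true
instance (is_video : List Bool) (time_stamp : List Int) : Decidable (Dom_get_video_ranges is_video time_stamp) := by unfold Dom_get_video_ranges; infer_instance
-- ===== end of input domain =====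

-- B scans maximal contiguous True runs of the zipped pairs explicitly (alternative decomposition);
-- A and B are generators in Python, the equivalence is about the yielded sequence as a list.

-- ===== PORT A =====
-- loop body of A's for-loop: state = (last_state, video_begin, t, yielded-so-far)
def pvAStep (st : Bool × Option Int × Int × List (Int × Int)) (kt : Bool × Int) :
    Bool × Option Int × Int × List (Int × Int) :=
  let vb' := if kt.1 && !st.1 then some kt.2 else st.2.1
  let acc' := if !kt.1 && st.1 then st.2.2.2 ++ [(vb'.getD 0, kt.2)] else st.2.2.2
  (kt.1, vb', kt.2, acc')

def get_video_ranges (is_video : List Bool) (time_stamp : List Int) : List (Int × Int) :=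
  let s := (is_video.zip time_stamp).foldl pvAStep (false, none, 0, [])
  if s.1 then s.2.2.2 ++ [(s.2.1.getD 0, s.2.2.1)] else s.2.2.2

-- ===== PORT B =====
-- inner while-loop: advance j over the contiguous True run, return the remainder pairs[j:]
def pvDropTrue : List (Bool × Int) → List (Bool × Int)
  | [] => []
  | (k, t) :: rest => if k then pvDropTrue rest else (k, t) :: rest

theorem pvDropTrue_length_le : ∀ l : List (Bool × Int), (pvDropTrue l).length ≤ l.length := by
  intro l
  induction l with
  | nil => simp [pvDropTrue]
  | cons x rest ih =>
    obtain ⟨k, t⟩ := x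
    simp only [pvDropTrue]
    split
    · exact Nat.le_succ_of_le ih
    · simp

-- outer while-loop over the remaining pairs; lastT is pairs[-1][1]
def pvAltOuter (lastT : Int) : List (Bool × Int) → List (Int × Int)
  | [] => []
  | (k, t) :: rest =>
    if k then
      match h : pvDropTrue rest with
      | [] => [(t, lastT)]
      | (k', t') :: rem => (t, t') :: pvAltOuter lastT ((k', t') :: rem)
    else pvAltOuter lastT rest
termination_by l => l.length
decreasing_by
  · have := pvDropTrue_length_le rest
    rw [h] at this
    simp at this ⊢
    omega
  · simp

def get_video_ranges_alt (is_video : List Bool) (time_stamp : List Int) : List (Int × Int) :=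
  let pairs := is_video.zip time_stamp
  match pairs.getLast? with
  | none => []
  | some lp => pvAltOuter lp.2 pairs

-- ===== PRECONDITION & SPEC =====
def Spec_get_video_ranges (is_video : List Bool) (time_stamp : List Int) (out : List (Int × Int)) : Prop := out = get_video_ranges_alt is_video time_stamp
instance (is_video : List Bool) (time_stamp : List Int) (out : List (Int × Int)) : Decidable (Spec_get_video_ranges is_video time_stamp out) := by unfold Spec_get_video_ranges; infer_instance

-- ===== CLAIM (what is proved, stated in full; the proofs are below) =====
def Claim_equal_get_video_ranges : Prop := ∀ (is_video : List Bool) (time_stamp : List Int), Dom_get_video_ranges is_video time_stamp → Spec_get_video_ranges is_video time_stamp (get_video_ranges is_video time_stamp)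

-- ===== LEMMAS AND PROOFS =====

-- a structural-recursion characterisation of A's state machine:
-- pvF p = output produced from state last_state = false, pvT p b t = from last_state = true,
-- video_begin = b, current t = t
mutual
def pvF : List (Bool × Int) → List (Int × Int)
  | [] => []
  | (k, t) :: rest => if k then pvT rest t t else pvF rest
def pvT : List (Bool × Int) → Int → Int → List (Int × Int)
  | [], b, t => [(b, t)]
  | (k, t') :: rest, b, _ => if k then pvT rest b t' else (b, t') :: pvF rest
end

def pvFin (s : Bool × Option Int × Int × List (Int × Int)) : List (Int × Int) :=
  if s.1 then s.2.2.2 ++ [(s.2.1.getD 0, s.2.2.1)] else s.2.2.2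

-- A's fold equals the pvF/pvT characterisation
theorem pvA_char : ∀ (p : List (Bool × Int)),
    (∀ vb t acc, pvFin (p.foldl pvAStep (false, vb, t, acc)) = acc ++ pvF p) ∧
    (∀ b t acc, pvFin (p.foldl pvAStep (true, some b, t, acc)) = acc ++ pvT p b t) := by
  intro p
  induction p with
  | nil => constructor <;> intros <;> simp [pvFin, pvF, pvT]
  | cons x rest ih =>
    obtain ⟨k, t⟩ := x
    constructor
    · intro vb t0 acc
      cases k
      · simpa [pvAStep, pvF] using (ih.1 vb t acc)
      · simpa [pvAStep, pvF] using (ih.2 t t acc)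
    · intro b t0 acc
      cases k
      · simp only [List.foldl_cons, pvAStep, Bool.false_and, Bool.not_false, Bool.and_true,
          Bool.not_true, Bool.and_false, if_false, if_true]
        rw [ih.1]
        simp [pvT]
      · simpa [pvAStep, pvT] using (ih.2 b t acc)

-- last timestamp of p, defaulting to t when p is empty
def pvLastGood (p : List (Bool × Int)) (t lastT : Int) : Prop :=
  (p.getLast?.map Prod.snd).getD t = lastT

theorem pvLastGood_cons (x : Bool × Int) (rest : List (Bool × Int)) (t lastT : Int) :
    pvLastGood (x :: rest) t lastT ↔ pvLastGood rest x.2 lastT := by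
  unfold pvLastGood
  cases h : rest.getLast? with
  | none => simp [List.getLast?_cons, h, List.getLast?_eq_none_iff.mp h]
  | some y =>
    have : (x :: rest).getLast? = some y := by
      rcases List.getLast?_eq_some_iff.mp h with ⟨l', hl⟩
      rw [List.getLast?_eq_some_iff]
      exact ⟨x :: l', by simp [hl]⟩
    simp [this, h]

-- one-step unfolding of the outer loop at a True element
theorem pvAltOuter_cons_true (lastT t0 : Int) (rest : List (Bool × Int)) :
    pvAltOuter lastT ((true, t0) :: rest) =
      match pvDropTrue rest with
      | [] => [(t0, lastT)]
      | (k', t') :: rem => (t0, t') :: pvAltOuter lastT ((k', t') :: rem) := by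
  rw [pvAltOuter]
  cases hd : pvDropTrue rest with
  | nil => simp
  | cons y rem => obtain ⟨k', t'⟩ := y; simp

-- pvF/pvT equal B's run scanner whenever lastT is correct
theorem pvFT_alt : ∀ (p : List (Bool × Int)) (lastT : Int),
    (∀ t, pvLastGood p t lastT → pvF p = pvAltOuter lastT p) ∧
    (∀ b t, pvLastGood p t lastT →
      pvT p b t = match pvDropTrue p with
        | [] => [(b, lastT)]
        | (k', t') :: rem => (b, t') :: pvAltOuter lastT ((k', t') :: rem)) := by
  intro p lastT
  induction p with
  | nil =>
    constructor
    · intro t _; simp [pvF, pvAltOuter]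
    · intro b t hg
      have : t = lastT := by simpa [pvLastGood] using hg
      simp [pvT, pvDropTrue, this]
  | cons x rest ih =>
    obtain ⟨k, t'⟩ := x
    constructor
    · intro t hg
      have hg' : pvLastGood rest t' lastT := (pvLastGood_cons _ _ _ _).mp hg
      cases k
      · rw [pvF, pvAltOuter]
        simp only [if_false, Bool.false_eq_true]
        exact ih.1 t' hg'
      · rw [pvF, pvAltOuter_cons_true]
        exact ih.2 t' t' hg'
    · intro b t hg
      have hg' : pvLastGood rest t' lastT := (pvLastGood_cons _ _ _ _).mp hg
      cases k
      · rw [pvT, pvDropTrue]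
        simp only [if_false, Bool.false_eq_true]
        rw [ih.1 t' hg']
        rw [pvAltOuter]
        simp
      · rw [pvT, pvDropTrue]
        simp only [if_true]
        exact ih.2 b t' hg'

-- ===== VERDICT (by name: the statement is the Claim_ definition above) =====
theorem get_video_ranges_spec : Claim_equal_get_video_ranges := by
  intro is_video time_stamp _
  unfold Spec_get_video_ranges get_video_ranges get_video_ranges_alt
  have hA : pvFin ((is_video.zip time_stamp).foldl pvAStep (false, none, 0, [])) =
      pvF (is_video.zip time_stamp) := by
    simpa using (pvA_char (is_video.zip time_stamp)).1 none 0 []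
  simp only [pvFin] at hA
  rw [hA]
  cases h : (is_video.zip time_stamp).getLast? with
  | none =>
    have : is_video.zip time_stamp = [] := List.getLast?_eq_none_iff.mp h
    simp [this, pvF]
  | some lp =>
    simp only [h]
    have hg : pvLastGood (is_video.zip time_stamp) 0 lp.2 := by
      simp [pvLastGood, h]
    exact (pvFT_alt (is_video.zip time_stamp) lp.2).1 0 hg
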